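-- pv_equiv track=rewrite | github.com/torchdotonions/hacktoberfest2023-DSA | agressive_cows.py | aggressive_cows
-- ===== SOURCE A (Python) =====
-- def can_place_cows(stalls, cows, min_distance):
--     placed_cows = 1
--     prev_position = stalls[0]
--
--     for i in range(1, len(stalls)):
--         if stalls[i] - prev_position >= min_distance:
--             placed_cows += 1
--             prev_position = stalls[i]
--
--             if placed_cows == cows:
--                 return True
--
--     return False
--
-- def aggressive_cows(stalls, cows):
--     stalls.sort()
--
--     # Define the search range
--     low = 1
--     high = stalls[-1] - stalls[0]
--
--     max_min_distance = 0
--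
--     while low <= high:
--         mid = (low + high) // 2
--
--         if can_place_cows(stalls, cows, mid):
--             max_min_distance = mid
--             low = mid + 1
--         else:
--             high = mid - 1
--
--     return max_min_distance
-- ===== SOURCE B (Python) =====
-- def can_place_cows(stalls, cows, min_distance):
--     placed_cows = 1
--     prev_position = stalls[0]
--
--     for i in range(1, len(stalls)):
--         if stalls[i] - prev_position >= min_distance:
--             placed_cows += 1
--             prev_position = stalls[i]
--
--             if placed_cows == cows:
--                 return True
--
--     return False
--
-- def aggressive_cows(stalls, cows):
--     stalls.sort()
--
--     # The optimal minimum distance is always the difference of two stall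
--     # positions, so maximize the feasible candidate over all pairs directly.
--     best = 0
--     for i, x in enumerate(stalls):
--         for y in stalls[i + 1:]:
--             d = y - x
--             if d > best and can_place_cows(stalls, cows, d):
--                 best = d
--
--     return best
-- ===== Notes on version B (the rewrite author's own statement) =====
-- stated objective: alternative
-- what changed: Replaces A's binary search over the answer range with a search-free exhaustive maximization: the optimal minimum distance is always a pairwise difference of the sorted stalls, so B takes the maximum feasible candidate over all stall pairs, using the same greedy feasibility helper.
import Mathlib
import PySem

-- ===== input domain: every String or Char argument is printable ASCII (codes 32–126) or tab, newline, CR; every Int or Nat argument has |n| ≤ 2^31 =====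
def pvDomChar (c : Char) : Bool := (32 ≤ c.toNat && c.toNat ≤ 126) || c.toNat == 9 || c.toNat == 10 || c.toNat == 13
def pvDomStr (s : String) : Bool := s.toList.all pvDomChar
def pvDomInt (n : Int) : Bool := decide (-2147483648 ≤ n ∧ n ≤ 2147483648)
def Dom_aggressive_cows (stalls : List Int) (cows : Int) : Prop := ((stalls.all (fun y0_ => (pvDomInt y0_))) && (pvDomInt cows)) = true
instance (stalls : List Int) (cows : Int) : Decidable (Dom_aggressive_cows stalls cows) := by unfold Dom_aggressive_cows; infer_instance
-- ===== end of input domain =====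

-- B replaces A's binary search on the answer by a search-free exhaustive maximization over
-- candidate distances drawn from pairwise stall differences (same greedy feasibility helper);
-- objective: alternative (not faster).  Both Pythons sort the stalls list IN PLACE (identical
-- mutation); the equivalence proved is about the return value.

-- ===== PORT A =====
-- helper: literal port of can_place_cows (identical in Source A and Source B); the loop over
-- range(1, len(stalls)) reading stalls[i] is ported as structural recursion over the tail.
-- (Python raises IndexError on stalls = []; that input is outside Pre_ and the [] branch is unreachable there.)
def canPlaceGo (cows : Int) (md : Int) : List Int → Int → Int → Bool
  | [], _, _ => false
  | s :: rest, placed, prev =>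
    if s - prev ≥ md then
      if placed + 1 = cows then true
      else canPlaceGo cows md rest (placed + 1) s
    else canPlaceGo cows md rest placed prev

def can_place_cows (stalls : List Int) (cows : Int) (min_distance : Int) : Bool :=
  match stalls with
  | [] => false
  | s0 :: rest => canPlaceGo cows min_distance rest 1 s0

-- the while-loop of A's binary search
def acLoop (s : List Int) (cows : Int) (low high acc : Int) : Int :=
  if h : low ≤ high then
    let mid := PySem.Int.floordiv (low + high) 2
    if can_place_cows s cows mid then acLoop s cows (mid + 1) high mid
    else acLoop s cows low (mid - 1) acc
  else acc
termination_by (high - low + 1).toNat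
decreasing_by
  · have := PySem.Int.floordiv_two_mid_bounds h; omega
  · have := PySem.Int.floordiv_two_mid_bounds h; omega

def aggressive_cows (stalls : List Int) (cows : Int) : Int :=
  let s := PySem.List.sorted stalls id false
  let high := (PySem.List.pyGet? s (-1)).getD 0 - (PySem.List.pyGet? s 0).getD 0
  acLoop s cows 1 high 0

-- ===== PORT B =====
-- B's inner loop: for y in stalls[i+1:], try the candidate distance y - x
def innerB (s : List Int) (cows : Int) (x : Int) : List Int → Int → Int
  | [], best => best
  | y :: rest, best =>
    innerB s cows x rest
      (if best < y - x ∧ can_place_cows s cows (y - x) = true then y - x else best)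

-- B's outer loop: for i, x in enumerate(stalls), paired with the tail after x
def outerB (s : List Int) (cows : Int) : List Int → Int → Int
  | [], best => best
  | x :: rest, best => outerB s cows rest (innerB s cows x rest best)

def aggressive_cows_alt (stalls : List Int) (cows : Int) : Int :=
  let s := PySem.List.sorted stalls id false
  outerB s cows s 0

-- ===== PRECONDITION & SPEC =====
-- Pre_ excludes only stalls = [], on which the Python A raises IndexError at stalls[-1].
def Pre_aggressive_cows (stalls : List Int) (cows : Int) : Prop := stalls ≠ []
instance (stalls : List Int) (cows : Int) : Decidable (Pre_aggressive_cows stalls cows) := by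
  unfold Pre_aggressive_cows; infer_instance

def pvWitness_aggressive_cows : List Int × Int := ([1, 2, 4, 8, 9], 3)

def Spec_aggressive_cows (stalls : List Int) (cows : Int) (out : Int) : Prop := out = aggressive_cows_alt stalls cows
instance (stalls : List Int) (cows : Int) (out : Int) : Decidable (Spec_aggressive_cows stalls cows out) := by unfold Spec_aggressive_cows; infer_instance

-- ===== CLAIM (what is proved, stated in full; the proofs are below) =====
def Claim_equal_aggressive_cows : Prop := ∀ (stalls : List Int) (cows : Int), Dom_aggressive_cows stalls cows → Pre_aggressive_cows stalls cows → Spec_aggressive_cows stalls cows (aggressive_cows stalls cows)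

-- ===== LEMMAS AND PROOFS =====

-- greedy placement count without early exit
def countGo (md : Int) : List Int → Int → Int
  | [], _ => 0
  | s :: rest, prev =>
    if s - prev ≥ md then 1 + countGo md rest s else countGo md rest prev

lemma countGo_nonneg (md : Int) (l : List Int) (prev : Int) : 0 ≤ countGo md l prev := by
  induction l generalizing prev with
  | nil => simp [countGo]
  | cons s rest ih =>
    simp only [countGo]
    split_ifs
    · have := ih s; omega
    · exact ih prev

-- early-exit loop reaches `cows` iff placed < cows and the full count reaches it
lemma canPlaceGo_iff (cows md : Int) (l : List Int) (placed prev : Int) :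
    canPlaceGo cows md l placed prev = true ↔ (placed < cows ∧ cows ≤ placed + countGo md l prev) := by
  induction l generalizing placed prev with
  | nil => simp [canPlaceGo, countGo]
  | cons s rest ih =>
    have hnn := countGo_nonneg md rest s
    simp only [canPlaceGo, countGo]
    split_ifs with hp he
    · constructor
      · intro _; omega
      · intro _; rfl
    · rw [ih]; omega
    · rw [ih]

-- the pairwise monotonicity invariant for the greedy count
lemma countGo_mono (d d' : Int) (hdd : d ≤ d') :
    ∀ (l : List Int), l.Pairwise (· ≤ ·) →
      ∀ (p p' k : Int), (∀ x ∈ l, p ≤ x) → (∀ x ∈ l, p' ≤ x) →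
        0 ≤ k → (p ≤ p' ∨ 1 ≤ k) →
        countGo d' l p' ≤ k + countGo d l p := by
  intro l
  induction l with
  | nil =>
    intro _ p p' k _ _ hk _
    simp [countGo]; omega
  | cons s rest ih =>
    intro hpw p p' k hp hp' hk hor
    have hps : p ≤ s := hp s (by simp)
    have hp's : p' ≤ s := hp' s (by simp)
    have hrest : rest.Pairwise (· ≤ ·) := hpw.of_cons
    have hsrest : ∀ x ∈ rest, s ≤ x := by
      intro x hx; exact List.rel_of_pairwise_cons hpw hx
    have hprest : ∀ x ∈ rest, p ≤ x := fun x hx => le_trans hps (hsrest x hx)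
    have hp'rest : ∀ x ∈ rest, p' ≤ x := fun x hx => le_trans hp's (hsrest x hx)
    simp only [countGo]
    split_ifs with h' h h
    · have := ih hrest s s k hsrest hsrest hk (Or.inl le_rfl)
      omega
    · rcases hor with hpp' | hk1
      · exact absurd (le_trans (by omega : d ≤ d') (le_trans h' (by omega))) h
      · have := ih hrest p s (k - 1) hprest hsrest (by omega) (by omega)
        omega
    · have := ih hrest s p' (k + 1) hsrest hp'rest (by omega) (by omega)
      omega
    · exact ih hrest p p' k hprest hp'rest hk hor

-- feasibility is downward closed in the distance (on a sorted stall list)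
lemma can_place_mono (s : List Int) (hs : s.Pairwise (· ≤ ·)) (cows d d' : Int) (hdd : d ≤ d')
    (h : can_place_cows s cows d' = true) : can_place_cows s cows d = true := by
  cases s with
  | nil => simpa [can_place_cows] using h
  | cons h0 rest =>
    simp only [can_place_cows] at h ⊢
    rw [canPlaceGo_iff] at h ⊢
    have hrest : ∀ x ∈ rest, h0 ≤ x := by
      intro x hx; exact List.rel_of_pairwise_cons hs hx
    have := countGo_mono d d' hdd rest hs.of_cons h0 h0 0 hrest hrest le_rfl (Or.inl le_rfl)
    omega

-- the greedy selection itself (the stalls countGo counts)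
def selGo (d : Int) : List Int → Int → List Int
  | [], _ => []
  | x :: rest, prev => if x - prev ≥ d then x :: selGo d rest x else selGo d rest prev

-- consecutive gaps (including the gap from prev) are all ≥ d
def Gaps (d : Int) : Int → List Int → Prop
  | _, [] => True
  | prev, x :: rest => x - prev ≥ d ∧ Gaps d x rest

lemma gaps_mono (d d' : Int) (hdd : d ≤ d') (c : List Int) :
    ∀ prev, Gaps d' prev c → Gaps d prev c := by
  induction c with
  | nil => intro _ _; trivial
  | cons x rest ih =>
    intro prev h
    obtain ⟨h1, h2⟩ := h
    exact ⟨by omega, ih x h2⟩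

lemma selGo_length (d : Int) (l : List Int) (prev : Int) :
    (selGo d l prev).length = (countGo d l prev).toNat := by
  induction l generalizing prev with
  | nil => simp [selGo, countGo]
  | cons x rest ih =>
    have hnn := countGo_nonneg d rest x
    simp only [selGo, countGo]
    split_ifs with h
    · simp [ih x]; omega
    · exact ih prev

lemma selGo_gaps (d : Int) (l : List Int) (prev : Int) : Gaps d prev (selGo d l prev) := by
  induction l generalizing prev with
  | nil => simp [selGo]; trivial
  | cons x rest ih =>
    simp only [selGo]
    split_ifs with h
    · exact ⟨h, ih x⟩
    · exact ih prev

lemma selGo_sublist (d : Int) (l : List Int) (prev : Int) : (selGo d l prev).Sublist l := by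
  induction l generalizing prev with
  | nil => simp [selGo]
  | cons x rest ih =>
    simp only [selGo]
    split_ifs with h
    · exact (ih x).cons₂ x
    · exact (ih prev).cons x

-- extract the minimum gap of a nonempty chain: it bounds all gaps and is realized
-- by two adjacent chain elements
lemma min_gap_extract (e : Int) (c : List Int) (hc : c ≠ []) :
    ∀ prev, Gaps e prev c →
      ∃ δ p q, e ≤ δ ∧ Gaps δ prev c ∧ (List.Sublist [p, q] (prev :: c)) ∧ δ = q - p := by
  induction c with
  | nil => exact absurd rfl hc
  | cons x rest ih =>
    intro prev hg
    cases rest with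
    | nil =>
      exact ⟨x - prev, prev, x, hg.1, ⟨by omega, trivial⟩, List.Sublist.refl _, by ring⟩
    | cons y c' =>
      obtain ⟨δ', p', q', h1, h2, h3, h4⟩ := ih (by simp) x hg.2
      by_cases hle : x - prev ≤ δ'
      · refine ⟨x - prev, prev, x, hg.1, ⟨by omega, gaps_mono _ _ hle _ _ h2⟩, ?_, by ring⟩
        exact ((List.nil_sublist (y :: c')).cons₂ x).cons₂ prev
      · exact ⟨δ', p', q', h1, ⟨by omega, h2⟩, h3.cons prev, h4⟩

-- greedy exchange: on a sorted list, the greedy count at δ is at least the length of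
-- any δ-chain (a sublist whose gaps from its own prev are all ≥ δ)
lemma exchange (δ : Int) :
    ∀ {c l : List Int}, c.Sublist l → l.Pairwise (· ≤ ·) →
      ∀ (pc pg k : Int), Gaps δ pc c → (∀ x ∈ l, pg ≤ x) →
        0 ≤ k → (pg ≤ pc ∨ 1 ≤ k) →
        (c.length : Int) ≤ k + countGo δ l pg := by
  intro c l hsub
  induction hsub with
  | slnil =>
    intro _ pc pg k _ _ hk _
    simp [countGo]; omega
  | @cons c l y hcl ih =>
    intro hpw pc pg k hg hpg hk hor
    have hrest : l.Pairwise (· ≤ ·) := hpw.of_cons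
    have hyl : ∀ x ∈ l, y ≤ x := fun x hx => List.rel_of_pairwise_cons hpw hx
    simp only [countGo]
    split_ifs with h
    · have := ih hrest pc y (k + 1) hg hyl (by omega) (by omega)
      omega
    · exact ih hrest pc pg k hg (fun x hx => hpg x (by simp [hx])) hk hor
  | @cons₂ c l x hcl ih =>
    intro hpw pc pg k hg hpg hk hor
    have hrest : l.Pairwise (· ≤ ·) := hpw.of_cons
    have hxl : ∀ z ∈ l, x ≤ z := fun z hz => List.rel_of_pairwise_cons hpw hz
    obtain ⟨hgap, hg'⟩ := hg
    simp only [countGo]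
    split_ifs with h
    · have := ih hrest x x k hg' hxl hk (Or.inl le_rfl)
      simp only [List.length_cons]
      push_cast
      omega
    · rcases hor with hpp | hk1
      · exact absurd (by omega : x - pg ≥ δ) h
      · have hpgx : pg ≤ x := hpg x (by simp)
        have := ih hrest x pg (k - 1) hg' (fun z hz => hpg z (by simp [hz])) (by omega)
          (Or.inl hpgx)
        simp only [List.length_cons]
        push_cast
        omega

-- a feasible distance e ≥ 1 is dominated by a feasible pairwise difference of s
lemma feasible_diff (a : Int) (t : List Int) (cows : Int)
    (hpw : (a :: t).Pairwise (· ≤ ·)) (e : Int) (he : 1 ≤ e)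
    (hf : can_place_cows (a :: t) cows e = true) :
    ∃ δ p q, e ≤ δ ∧ can_place_cows (a :: t) cows δ = true ∧
      (List.Sublist [p, q] (a :: t)) ∧ δ = q - p := by
  simp only [can_place_cows] at hf
  rw [canPlaceGo_iff] at hf
  obtain ⟨hc2, hcnt⟩ := hf
  have hat : ∀ x ∈ t, a ≤ x := fun x hx => List.rel_of_pairwise_cons hpw hx
  set c := selGo e t a with hcdef
  have hlen : (c.length : Int) = countGo e t a := by
    rw [hcdef, selGo_length]
    have := countGo_nonneg e t a
    omega
  have hne : c ≠ [] := by
    intro h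
    rw [h] at hlen
    simp at hlen
    omega
  obtain ⟨δ, p, q, h1, h2, h3, h4⟩ := min_gap_extract e c hne a (selGo_gaps e t a)
  refine ⟨δ, p, q, h1, ?_, ?_, h4⟩
  · simp only [can_place_cows]
    rw [canPlaceGo_iff]
    have hx := exchange δ (selGo_sublist e t a) hpw.of_cons a a 0 h2 hat le_rfl (Or.inl le_rfl)
    rw [← hcdef, hlen] at hx
    constructor
    · omega
    · omega
  · exact h3.trans ((selGo_sublist e t a).cons₂ a)

-- membership bounds on a sorted nonempty list
lemma mem_le_getLast (l : List Int) (hs : l.Pairwise (· ≤ ·)) (x : Int) (hx : x ∈ l) :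
    x ≤ l.getLast (List.ne_nil_of_mem hx) := by
  induction l with
  | nil => cases hx
  | cons a t ih =>
    cases t with
    | nil => simp at hx; simp [hx]
    | cons b u =>
      rcases List.mem_cons.1 hx with rfl | hx'
      · have : x ≤ (b :: u).getLast (by simp) :=
          List.rel_of_pairwise_cons hs (List.getLast_mem _)
        simpa [List.getLast] using this
      · have := ih hs.of_cons hx'
        simpa [List.getLast] using this

-- B's inner loop only ever increases best
lemma innerB_mono (s : List Int) (cows x : Int) (l : List Int) (best : Int) :
    best ≤ innerB s cows x l best := by
  induction l generalizing best with
  | nil => simp [innerB]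
  | cons y rest ih =>
    simp only [innerB]
    refine le_trans ?_ (ih _)
    split_ifs with h
    · omega
    · exact le_rfl

lemma outerB_mono (s : List Int) (cows : Int) (l : List Int) (best : Int) :
    best ≤ outerB s cows l best := by
  induction l generalizing best with
  | nil => simp [outerB]
  | cons x rest ih =>
    simp only [outerB]
    exact le_trans (innerB_mono s cows x rest best) (ih _)

-- the soundness invariant B's best maintains
def InvB (s : List Int) (cows best : Int) : Prop :=
  best = 0 ∨ (1 ≤ best ∧ can_place_cows s cows best = true ∧
    ∃ p q, (List.Sublist [p, q] s) ∧ best = q - p)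

lemma innerB_sound (s : List Int) (cows x : Int) (l : List Int) (best : Int)
    (hpair : ∀ y ∈ l, List.Sublist [x, y] s) (hinv : InvB s cows best) :
    InvB s cows (innerB s cows x l best) := by
  induction l generalizing best with
  | nil => simpa [innerB] using hinv
  | cons y rest ih =>
    simp only [innerB]
    refine ih _ (fun z hz => hpair z (by simp [hz])) ?_
    split_ifs with h
    · right
      have hb0 : 0 ≤ best := by rcases hinv with h0 | ⟨h1, _⟩ <;> omega
      exact ⟨by omega, h.2, x, y, hpair y (by simp), rfl⟩
    · exact hinv

lemma outerB_sound (s : List Int) (cows : Int) (l : List Int) (best : Int)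
    (hsub : l.Sublist s) (hinv : InvB s cows best) :
    InvB s cows (outerB s cows l best) := by
  induction l generalizing best with
  | nil => simpa [outerB] using hinv
  | cons x rest ih =>
    simp only [outerB]
    have hrest : rest.Sublist s := ((List.sublist_cons_self x rest).trans hsub)
    refine ih _ hrest ?_
    refine innerB_sound s cows x rest best (fun y hy => ?_) hinv
    exact (((List.singleton_sublist.2 hy).cons₂ x)).trans hsub

-- completeness of the inner loop: any candidate pair (x, y) with y in its list is covered
lemma innerB_complete (s : List Int) (cows x : Int) (l : List Int) (best y : Int)
    (hy : y ∈ l) (hf : can_place_cows s cows (y - x) = true) :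
    y - x ≤ innerB s cows x l best := by
  induction l generalizing best with
  | nil => cases hy
  | cons y' rest ih =>
    simp only [innerB]
    rcases List.mem_cons.1 hy with rfl | hy'
    · refine le_trans ?_ (innerB_mono s cows x rest _)
      split_ifs with h
      · exact le_rfl
      · rcases not_and_or.1 h with h1 | h2
        · omega
        · exact absurd hf h2
    · exact ih _ hy'

-- completeness of the outer loop: any pair sublist of its list is covered
lemma outerB_complete (s : List Int) (cows : Int) (l : List Int) (best p q : Int)
    (hsub : List.Sublist [p, q] l) (hf : can_place_cows s cows (q - p) = true) :
    q - p ≤ outerB s cows l best := by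
  induction l generalizing best with
  | nil => simp at hsub
  | cons x rest ih =>
    simp only [outerB]
    cases hsub with
    | cons _ h => exact ih _ h
    | cons₂ _ h =>
      exact le_trans (innerB_complete s cows p rest best q (List.singleton_sublist.1 h) hf)
        (outerB_mono s cows rest _)

-- A's binary search returns r, for any r characterized as the maximum feasible distance
lemma acLoop_eq (s : List Int) (hs : s.Pairwise (· ≤ ·)) (cows h0 : Int)
    (r : Int) (hr0 : 0 ≤ r)
    (hrf : 1 ≤ r → can_place_cows s cows r = true)
    (hrmax : ∀ e, 1 ≤ e → e ≤ h0 → can_place_cows s cows e = true → e ≤ r) :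
    ∀ low high acc : Int,
      acc ≤ r → r ≤ high → low ≤ r + 1 → (acc = r ∨ low ≤ r) → 1 ≤ low → high ≤ h0 →
      acLoop s cows low high acc = r := by
  intro low high acc
  induction low, high, acc using acLoop.induct s cows with
  | case1 low high acc hle mid hcp ih =>
    intro h1 h2 h3 h4 h5 h6
    have hb := PySem.Int.floordiv_two_mid_bounds hle
    rw [acLoop, dif_pos hle, if_pos hcp]
    have hmidr : mid ≤ r := hrmax mid (by omega) (by omega) hcp
    exact ih hmidr h2 (by omega) (by omega) (by omega) h6
  | case2 low high acc hle mid hcp ih =>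
    intro h1 h2 h3 h4 h5 h6
    have hb := PySem.Int.floordiv_two_mid_bounds hle
    rw [acLoop, dif_pos hle, if_neg hcp]
    have hrmid : r < mid := by
      by_contra hcon
      push_neg at hcon
      have hr1 : 1 ≤ r := by omega
      exact absurd (can_place_mono s hs cows mid r hcon (hrf hr1)) (by simp [hcp])
    exact ih h1 (by omega) h3 h4 h5 (by omega)
  | case3 low high acc hle =>
    intro h1 h2 h3 h4 h5 h6
    rw [acLoop, dif_neg hle]
    omega

-- head of a sorted nonempty list bounds the last element, so high ≥ 0
lemma head_le_getLast (l : List Int) (hl : l ≠ []) (hs : l.Pairwise (· ≤ ·)) :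
    l.head hl ≤ l.getLast hl := by
  cases l with
  | nil => exact absurd rfl hl
  | cons a t =>
    cases t with
    | nil => simp
    | cons b u =>
      have : a ≤ (b :: u).getLast (by simp) :=
        List.rel_of_pairwise_cons hs (List.getLast_mem _)
      simpa using this

-- the two ports agree on any sorted nonempty stall list
lemma main_aux (a : Int) (t : List Int) (cows : Int)
    (hpw : (a :: t).Pairwise (· ≤ ·)) :
    acLoop (a :: t) cows 1 ((a :: t).getLast (by simp) - a) 0 =
      outerB (a :: t) cows (a :: t) 0 := by
  have hne : (a :: t) ≠ [] := List.cons_ne_nil a t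
  show acLoop (a :: t) cows 1 ((a :: t).getLast hne - a) 0 = outerB (a :: t) cows (a :: t) 0
  have hh0 : 0 ≤ (a :: t).getLast hne - a := by
    have h := head_le_getLast (a :: t) hne hpw
    simp only [List.head_cons] at h
    omega
  have hinv : InvB (a :: t) cows (outerB (a :: t) cows (a :: t) 0) :=
    outerB_sound (a :: t) cows (a :: t) 0 (List.Sublist.refl _) (Or.inl rfl)
  have hr0 : 0 ≤ outerB (a :: t) cows (a :: t) 0 := by
    rcases hinv with h | ⟨h1, _⟩ <;> omega
  have hrf : 1 ≤ outerB (a :: t) cows (a :: t) 0 →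
      can_place_cows (a :: t) cows (outerB (a :: t) cows (a :: t) 0) = true := by
    intro h1
    rcases hinv with h0 | ⟨_, h2, _⟩
    · omega
    · exact h2
  have hrhigh : outerB (a :: t) cows (a :: t) 0 ≤ (a :: t).getLast hne - a := by
    rcases hinv with h0 | ⟨_, _, p, q, hsub, heq⟩
    · omega
    · have hp : p ∈ (a :: t) := hsub.mem (by simp)
      have hq : q ∈ (a :: t) := hsub.mem (by simp)
      have hap : a ≤ p := by
        rcases List.mem_cons.1 hp with rfl | hp'
        · exact le_rfl
        · exact List.rel_of_pairwise_cons hpw hp'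
      have hqlast : q ≤ (a :: t).getLast hne := mem_le_getLast (a :: t) hpw q hq
      omega
  have hrmax : ∀ e, 1 ≤ e → e ≤ (a :: t).getLast hne - a →
      can_place_cows (a :: t) cows e = true → e ≤ outerB (a :: t) cows (a :: t) 0 := by
    intro e he1 _ hef
    obtain ⟨δ, p, q, h1, h2, h3, h4⟩ := feasible_diff a t cows hpw e he1 hef
    have := outerB_complete (a :: t) cows (a :: t) 0 p q h3 (h4 ▸ h2)
    omega
  exact acLoop_eq (a :: t) hpw cows ((a :: t).getLast hne - a) _ hr0 hrf hrmax 1 _ 0 hr0 hrhigh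
    (by omega) (by omega) le_rfl le_rfl

-- ===== VERDICT (by name: the statement is the Claim_ definition above) =====
theorem aggressive_cows_spec : Claim_equal_aggressive_cows := by
  intro stalls cows _ hpre
  unfold Spec_aggressive_cows aggressive_cows aggressive_cows_alt
  have hsne : PySem.List.sorted stalls id false ≠ [] := by
    intro h
    have := PySem.List.sorted_perm (xs := stalls) (key := id) (rev := false)
    rw [h] at this
    exact hpre (this.symm.eq_nil)
  have hpw : (PySem.List.sorted stalls id false).Pairwise (· ≤ ·) := by
    simpa using PySem.List.sorted_pairwise (xs := stalls) (key := id)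
  obtain ⟨a, t, hat⟩ := List.exists_cons_of_ne_nil hsne
  rw [hat] at hpw
  show acLoop _ cows 1 _ 0 = outerB _ cows _ 0
  rw [hat, PySem.List.pyGet?_neg_one, List.getLast?_eq_some_getLast (by simp),
    PySem.List.pyGet?_zero_cons]
  simpa using main_aux a t cows hpw
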